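-- pv_equiv track=rewrite | github.com/elton0022/UFC | Inteligência Artificial/Lista (c) - Python/parte1.py | firstSixMultiples
-- ===== SOURCE A (Python) =====
-- def firstSixMultiples(n, i, j):
--     vet = []
--     number = 0
--     while n != 0:
--         if(number % i == 0 or number % j == 0):
--             vet.append(number)
--             n = n - 1
--
--         number = number + 1
--
--     return vet
-- ===== SOURCE B (Python) =====
-- def firstSixMultiples(n, i, j):
--     # Two-pointer merge of the streams of non-negative multiples of |i| and |j|
--     # (a number is divisible by 0 only if it is 0, so the stream of multiples of 0
--     # is just [0]); each output element costs O(1) instead of A's scan with two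
--     # modulo tests per integer.
--     a, b = abs(i), abs(j)
--     out = []
--     x, y = 0, 0          # next unemitted value of each stream; None = exhausted
--     while len(out) < n:
--         m = min(v for v in (x, y) if v is not None)
--         out.append(m)
--         if x == m:
--             x = x + a if a else None
--         if y == m:
--             y = y + b if b else None
--     return out
-- ===== Notes on version B (the rewrite author's own statement) =====
-- stated objective: faster
-- what changed: Instead of scanning every integer 0,1,2,... and testing each with two modulo operations, B merges the two streams of non-negative multiples of |i| and |j| with two pointers (a stream of multiples of 0 is just [0]; both pointers advance on a tie so lcm multiples appear once), producing each output element in O(1).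
import Mathlib
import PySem

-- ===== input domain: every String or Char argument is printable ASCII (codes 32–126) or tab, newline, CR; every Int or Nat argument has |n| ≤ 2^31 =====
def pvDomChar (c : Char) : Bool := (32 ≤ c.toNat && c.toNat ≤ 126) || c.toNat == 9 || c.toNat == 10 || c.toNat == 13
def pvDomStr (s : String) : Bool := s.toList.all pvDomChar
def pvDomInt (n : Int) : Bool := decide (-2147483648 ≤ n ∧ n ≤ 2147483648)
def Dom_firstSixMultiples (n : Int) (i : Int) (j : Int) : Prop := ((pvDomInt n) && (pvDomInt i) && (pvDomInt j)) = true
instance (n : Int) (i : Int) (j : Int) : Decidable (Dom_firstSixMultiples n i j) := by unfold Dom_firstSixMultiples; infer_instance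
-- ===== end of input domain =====

-- B replaces A's unit-step scan (two modulo tests per integer) by a two-pointer merge of the
-- streams of non-negative multiples of |i| and |j| (multiples of 0 = just [0]), O(1) per element.

-- ===== PORT A =====
-- A's while-loop with explicit fuel; on inputs satisfying Pre_ the loop performs at most
-- n.toNat * i.natAbs iterations, so the fuel is only a totality guard, not an algorithm change.
def pvALoop (i j : Int) : Nat → List Int → Int → Int → List Int
  | 0, vet, _, _ => vet
  | fuel + 1, vet, number, n =>
    if n ≠ 0 then
      if PySem.Int.mod number i = 0 ∨ PySem.Int.mod number j = 0 then
        pvALoop i j fuel (vet ++ [number]) (number + 1) (n - 1)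
      else
        pvALoop i j fuel vet (number + 1) n
    else vet

def firstSixMultiples (n : Int) (i : Int) (j : Int) : List Int :=
  pvALoop i j (n.toNat * i.natAbs) [] 0 n

-- ===== PORT B =====
-- 'while len(out) < n: m = min(v for v in (x, y) if v is not None); out.append(m);
--  if x == m: x = x + a if a else None; if y == m: y = y + b if b else None'
-- Fuel counts the remaining iterations: each iteration appends exactly one element, so the
-- loop runs exactly (n - len(out)).toNat more times. In the branch where both streams are
-- exhausted Python's min raises ValueError (reachable only outside Pre_); the port returns out.
def pvBLoop (a b : Int) : Nat → List Int → Option Int → Option Int → List Int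
  | 0, out, _, _ => out
  | k + 1, out, x, y =>
    match ([x, y].filterMap id).min? with
    | none => out
    | some m =>
      pvBLoop a b k (out ++ [m])
        (if x = some m then (if 0 < a then some (m + a) else none) else x)
        (if y = some m then (if 0 < b then some (m + b) else none) else y)

def firstSixMultiples_alt (n : Int) (i : Int) (j : Int) : List Int :=
  pvBLoop |i| |j| n.toNat [] (some 0) (some 0)

-- ===== PRECONDITION & SPEC =====
-- Pre_ excludes exactly the inputs on which A does not return a value: n < 0 (the loop never
-- terminates) and the ZeroDivisionError cases (i = 0 with n ≥ 1, and j = 0 with |i| ≠ 1 and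
-- n ≥ 2); every input on which A returns is admitted.
def Pre_firstSixMultiples (n : Int) (i : Int) (j : Int) : Prop :=
  0 ≤ n ∧ (n = 0 ∨ (i ≠ 0 ∧ (j ≠ 0 ∨ i = 1 ∨ i = -1 ∨ n = 1)))
instance (n : Int) (i : Int) (j : Int) : Decidable (Pre_firstSixMultiples n i j) := by
  unfold Pre_firstSixMultiples; infer_instance

def pvWitness_firstSixMultiples : Int × Int × Int := (6, 2, 3)

def Spec_firstSixMultiples (n : Int) (i : Int) (j : Int) (out : List Int) : Prop := out = firstSixMultiples_alt n i j
instance (n : Int) (i : Int) (j : Int) (out : List Int) : Decidable (Spec_firstSixMultiples n i j out) := by unfold Spec_firstSixMultiples; infer_instance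

-- ===== CLAIM (what is proved, stated in full; the proofs are below) =====
def Claim_equal_firstSixMultiples : Prop := ∀ (n : Int) (i : Int) (j : Int), Dom_firstSixMultiples n i j → Pre_firstSixMultiples n i j → Spec_firstSixMultiples n i j (firstSixMultiples n i j)


-- ===== LEMMAS AND PROOFS =====

-- distance from m up to the next multiple of a (for 0 < a: the least d ≥ 0 with a ∣ m + d)
def pvGap (a m : Int) : Int := (-m) % a

-- the common reference: the k smallest integers ≥ m divisible by |i| or |j|, in order
def pvSpec (a b : Int) : Nat → Int → List Int
  | 0, _ => []
  | k + 1, m =>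
    (m + min (pvGap a m) (pvGap b m)) :: pvSpec a b k (m + min (pvGap a m) (pvGap b m) + 1)

lemma pv_emod_eq (a x r : Int) (ha : 0 < a) (h0 : 0 ≤ r) (h1 : r < a) (hd : a ∣ (x - r)) :
    x % a = r := by
  obtain ⟨q, hq⟩ := hd
  have hx : x = r + a * q := by linarith
  rw [hx, Int.add_mul_emod_self_left, Int.emod_eq_of_lt h0 h1]

lemma pvGap_nonneg (a m : Int) (ha : 0 < a) : 0 ≤ pvGap a m := Int.emod_nonneg _ (by omega)

lemma pvGap_lt (a m : Int) (ha : 0 < a) : pvGap a m < a := Int.emod_lt_of_pos _ ha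

lemma pvGap_succ (a m : Int) (ha : 0 < a) :
    pvGap a (m + 1) = if pvGap a m = 0 then a - 1 else pvGap a m - 1 := by
  have hn := pvGap_nonneg a m ha
  have hlt := pvGap_lt a m ha
  have h := Int.ediv_add_emod (-m) a
  simp only [pvGap] at *
  split_ifs with hg
  · apply pv_emod_eq _ _ _ ha (by omega) (by omega)
    exact ⟨(-m) / a - 1, by linear_combination (-1 : Int) * h + hg⟩
  · apply pv_emod_eq _ _ _ ha (by omega) (by omega)
    exact ⟨(-m) / a, by linear_combination (-1 : Int) * h⟩

lemma pv_cond_iff (i m : Int) : (PySem.Int.mod m i = 0) ↔ pvGap |i| m = 0 := by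
  rw [PySem.Int.mod_eq_zero_iff_dvd, pvGap, PySem.Int.emod_eq_zero_iff_dvd, dvd_neg, abs_dvd]

lemma pvAScan (i j : Int) (hi : i ≠ 0) (hj : j ≠ 0) :
    ∀ (d fuel : Nat) (vet : List Int) (m n : Int), n ≠ 0 →
      (d : Int) = min (pvGap |i| m) (pvGap |j| m) →
      pvALoop i j (fuel + (d + 1)) vet m n
        = pvALoop i j fuel (vet ++ [m + d]) (m + d + 1) (n - 1) := by
  intro d
  have hia : (0:Int) < |i| := abs_pos.mpr hi
  have hja : (0:Int) < |j| := abs_pos.mpr hj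
  induction d with
  | zero =>
    intro fuel vet m n hn hd
    have hgi := pvGap_nonneg |i| m hia
    have hgj := pvGap_nonneg |j| m hja
    have hcond : PySem.Int.mod m i = 0 ∨ PySem.Int.mod m j = 0 := by
      rw [pv_cond_iff i m, pv_cond_iff j m]
      simp at hd; omega
    show pvALoop i j (fuel + 1) vet m n = _
    rw [pvALoop, if_pos hn, if_pos hcond]
    norm_num
  | succ d ih =>
    intro fuel vet m n hn hd
    have hgi := pvGap_nonneg |i| m hia
    have hgj := pvGap_nonneg |j| m hja
    have hgi1 : pvGap |i| m ≠ 0 := by push_cast at hd; omega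
    have hgj1 : pvGap |j| m ≠ 0 := by push_cast at hd; omega
    have hcond : ¬ (PySem.Int.mod m i = 0 ∨ PySem.Int.mod m j = 0) := by
      rw [pv_cond_iff i m, pv_cond_iff j m]; tauto
    have hstep : fuel + ((d + 1 : Nat) + 1) = (fuel + (d + 1)) + 1 := by omega
    rw [hstep]
    rw [pvALoop, if_pos hn, if_neg hcond]
    have hd' : (d : Int) = min (pvGap |i| (m + 1)) (pvGap |j| (m + 1)) := by
      rw [pvGap_succ |i| m hia, pvGap_succ |j| m hja, if_neg hgi1, if_neg hgj1]
      push_cast at hd ⊢; omega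
    have := ih fuel vet (m + 1) n hn hd'
    rw [this]
    push_cast
    ring_nf

lemma pvALoop_eq_spec (i j : Int) (hi : i ≠ 0) (hj : j ≠ 0) :
    ∀ (k : Nat) (fuel : Nat) (vet : List Int) (m : Int), k * i.natAbs ≤ fuel →
      pvALoop i j fuel vet m (k : Int) = vet ++ pvSpec |i| |j| k m := by
  intro k
  have hia : (0:Int) < |i| := abs_pos.mpr hi
  have hja : (0:Int) < |j| := abs_pos.mpr hj
  induction k with
  | zero =>
    intro fuel vet m _
    cases fuel with
    | zero => simp [pvALoop, pvSpec]
    | succ f => rw [pvALoop, if_neg (by norm_num)]; simp [pvSpec]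
  | succ k ih =>
    intro fuel vet m hfuel
    have hgi := pvGap_nonneg |i| m hia
    have hgj := pvGap_nonneg |j| m hja
    have hgilt := pvGap_lt |i| m hia
    set g : Int := min (pvGap |i| m) (pvGap |j| m) with hg
    have hg0 : 0 ≤ g := by omega
    have hga : g < (i.natAbs : Int) := by
      have : (i.natAbs : Int) = |i| := Int.abs_eq_natAbs i ▸ rfl
      omega
    set d : Nat := g.toNat with hdn
    have hdi : (d : Int) = g := Int.toNat_of_nonneg hg0
    have hd1 : d + 1 ≤ i.natAbs := by omega
    have hmul : (k + 1) * i.natAbs = k * i.natAbs + i.natAbs := by ring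
    have hfe : fuel = (fuel - (d + 1)) + (d + 1) := by omega
    have hk1 : ((k : Int) + 1) ≠ 0 := by omega
    have hcast : (((k + 1 : Nat)) : Int) = (k : Int) + 1 := by push_cast; ring
    rw [hcast, hfe, pvAScan i j hi hj d (fuel - (d + 1)) vet m ((k : Int) + 1) hk1 (by rw [hdi])]
    have hsub : (k : Int) + 1 - 1 = (k : Int) := by ring
    rw [hsub, ih (fuel - (d + 1)) (vet ++ [m + d]) (m + d + 1) (by omega)]
    show _ = vet ++ pvSpec |i| |j| (k + 1) m
    rw [pvSpec, hdi, List.append_assoc]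
    rfl

-- A's loop terminates immediately once n = 0, whatever the fuel
lemma pvALoop_zero (i j : Int) (fuel : Nat) (vet : List Int) (m : Int) :
    pvALoop i j fuel vet m 0 = vet := by
  cases fuel with
  | zero => rfl
  | succ f => rw [pvALoop, if_neg (by norm_num)]

-- if |i| = 1 the condition is always true: A emits every number (j never consulted)
lemma pvAOnes (i j : Int) (hi : i = 1 ∨ i = -1) :
    ∀ (k fuel : Nat) (vet : List Int) (m : Int), k ≤ fuel →
      pvALoop i j fuel vet m (k : Int) = vet ++ pvSpec 1 1 k m := by
  intro k
  induction k with
  | zero =>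
    intro fuel vet m _
    rw [Nat.cast_zero, pvALoop_zero]
    simp [pvSpec]
  | succ k ih =>
    intro fuel vet m hfuel
    obtain ⟨f, rfl⟩ : ∃ f, fuel = f + 1 := ⟨fuel - 1, by omega⟩
    have hcond : PySem.Int.mod m i = 0 ∨ PySem.Int.mod m j = 0 := by
      left
      rw [pv_cond_iff i m]
      rcases hi with h | h <;> simp [h, pvGap, Int.emod_one]
    have hn : ((k + 1 : Nat) : Int) ≠ 0 := by push_cast; omega
    rw [pvALoop, if_pos hn, if_pos hcond]
    have hsub : ((k + 1 : Nat) : Int) - 1 = (k : Int) := by push_cast; ring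
    rw [hsub, ih f (vet ++ [m]) (m + 1) (by omega)]
    have hspec : pvSpec 1 1 (k + 1) m = m :: pvSpec 1 1 k (m + 1) := by
      show (m + min (pvGap 1 m) (pvGap 1 m)) :: _ = _
      simp [pvGap, Int.emod_one]
    rw [hspec, List.append_assoc]
    rfl

-- pointer update: from the next multiple m+g, after emitting m+h (h ≤ g), the stream's
-- next multiple is (m+h+1) + gap a (m+h+1)
lemma pvPtrStep (a m g h : Int) (ha : 0 < a) (hg : g = pvGap a m) (hh : 0 ≤ h) (hle : h ≤ g) :
    (if m + g = m + h then m + h + a else m + g) = (m + h + 1) + pvGap a (m + h + 1) := by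
  have h1 : pvGap a (m + h) = g - h := by
    have hlt := pvGap_lt a m ha
    have hnn := pvGap_nonneg a m ha
    have heq := Int.ediv_add_emod (-m) a
    subst hg
    simp only [pvGap] at *
    apply pv_emod_eq _ _ _ ha (by omega) (by omega)
    exact ⟨(-m) / a, by linear_combination (-1 : Int) * heq⟩
  have h2 := pvGap_succ a (m + h) ha
  rw [h1] at h2
  rw [h2]
  split_ifs <;> omega

lemma pvBLoop_eq_spec (a b : Int) (ha : 0 < a) (hb : 0 < b) :
    ∀ (k : Nat) (out : List Int) (m : Int),
      pvBLoop a b k out (some (m + pvGap a m)) (some (m + pvGap b m)) = out ++ pvSpec a b k m := by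
  intro k
  induction k with
  | zero => intro out m; simp [pvBLoop, pvSpec]
  | succ k ih =>
    intro out m
    have hgi := pvGap_nonneg a m ha
    have hgj := pvGap_nonneg b m hb
    set ga : Int := pvGap a m with hga
    set gb : Int := pvGap b m with hgb
    set h : Int := min ga gb with hh
    have hh0 : 0 ≤ h := by omega
    have hmin : ([some (m + ga), some (m + gb)].filterMap (id : Option Int → Option Int)).min?
        = some (m + h) := by
      simp [List.filterMap, List.min?, min_def, hh]
      omega
    rw [pvBLoop]
    rw [hmin]
    simp only [Option.some.injEq, if_pos ha, if_pos hb, ← apply_ite (f := Option.some)]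
    rw [pvPtrStep a m ga h ha hga hh0 (by omega),
        pvPtrStep b m gb h hb hgb hh0 (by omega),
        ih (out ++ [m + h]) (m + h + 1)]
    rw [pvSpec, List.append_assoc]
    rfl

-- once the b-stream is exhausted and a = 1, B emits consecutive integers
lemma pvBOnes : ∀ (k : Nat) (out : List Int) (x : Int),
    pvBLoop 1 0 k out (some x) none = out ++ pvSpec 1 1 k x := by
  intro k
  induction k with
  | zero => intro out x; simp [pvBLoop, pvSpec]
  | succ k ih =>
    intro out x
    rw [pvBLoop]
    have hmin : ([some x, (none : Option Int)].filterMap id).min? = some x := by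
      simp [List.filterMap, List.min?]
    rw [hmin]
    simp only [if_pos (by norm_num : (0:Int) < 1), reduceCtorEq, if_true, if_false]
    rw [ih (out ++ [x]) (x + 1)]
    have hspec : pvSpec 1 1 (k + 1) x = x :: pvSpec 1 1 k (x + 1) := by
      show (x + min (pvGap 1 x) (pvGap 1 x)) :: _ = _
      simp [pvGap, Int.emod_one]
    rw [hspec, List.append_assoc]
    rfl

lemma pvGap_zero (a : Int) : pvGap a 0 = 0 := by simp [pvGap]

-- B with a = 1, b = 0, started at (0,0): first step emits 0 and exhausts the b-stream
lemma pvBCaseOne (k : Nat) : pvBLoop 1 0 (k + 1) [] (some 0) (some 0) = pvSpec 1 1 (k + 1) 0 := by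
  rw [pvBLoop]
  have hmin : ([some (0:Int), some 0].filterMap id).min? = some 0 := by
    simp [List.filterMap, List.min?]
  rw [hmin]
  norm_num
  rw [pvBOnes k [0] 1]
  have hspec : pvSpec 1 1 (k + 1) 0 = 0 :: pvSpec 1 1 k 1 := by
    show ((0:Int) + min (pvGap 1 0) (pvGap 1 0)) :: _ = _
    simp [pvGap]
  rw [hspec]
  rfl

-- ===== VERDICT (by name: the statement is the Claim_ definition above) =====
theorem firstSixMultiples_spec : Claim_equal_firstSixMultiples := by
  intro n i j _ hpre
  obtain ⟨hn, hc⟩ := hpre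
  unfold Spec_firstSixMultiples firstSixMultiples firstSixMultiples_alt
  by_cases hn0 : n = 0
  · subst hn0; simp [pvALoop_zero, pvBLoop]
  · obtain ⟨hi, hrest⟩ := hc.resolve_left hn0
    have hnt : n = (n.toNat : Int) := (Int.toNat_of_nonneg hn).symm
    by_cases hj : j ≠ 0
    · -- main case: both divisors nonzero — merge of the two gapped streams
      have hia : (0:Int) < |i| := abs_pos.mpr hi
      have hja : (0:Int) < |j| := abs_pos.mpr hj
      have hA := pvALoop_eq_spec i j hi hj n.toNat (n.toNat * i.natAbs) [] 0 le_rfl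
      rw [← hnt] at hA
      have hB := pvBLoop_eq_spec |i| |j| hia hja n.toNat [] 0
      rw [pvGap_zero, pvGap_zero] at hB
      norm_num at hB
      rw [hA, hB]
      simp
    · -- j = 0: A returns only when |i| = 1 (emit every number) or n = 1 (emit just 0)
      push_neg at hj
      subst hj
      rcases hrest with h0 | h1 | hm1 | hn1
      · exact absurd rfl h0
      · -- i = 1
        subst h1
        have hA := pvAOnes 1 0 (Or.inl rfl) n.toNat (n.toNat * (1:Int).natAbs) [] 0 (by simp)
        rw [← hnt] at hA
        rw [hA]
        obtain ⟨k, hk⟩ : ∃ k, n.toNat = k + 1 := ⟨n.toNat - 1, by omega⟩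
        show _ = pvBLoop |(1:Int)| |(0:Int)| n.toNat [] (some 0) (some 0)
        have habs1 : |(1:Int)| = 1 := by norm_num
        have habs0 : |(0:Int)| = 0 := by norm_num
        rw [habs1, habs0, hk, pvBCaseOne]
        simp
      · -- i = -1
        subst hm1
        have hA := pvAOnes (-1) 0 (Or.inr rfl) n.toNat (n.toNat * (-1:Int).natAbs) [] 0 (by simp)
        rw [← hnt] at hA
        rw [hA]
        obtain ⟨k, hk⟩ : ∃ k, n.toNat = k + 1 := ⟨n.toNat - 1, by omega⟩
        show _ = pvBLoop |(-1:Int)| |(0:Int)| n.toNat [] (some 0) (some 0)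
        have habs1 : |(-1:Int)| = 1 := by norm_num
        have habs0 : |(0:Int)| = 0 := by norm_num
        rw [habs1, habs0, hk, pvBCaseOne]
        simp
      · -- n = 1: both sides emit exactly [0]
        subst hn1
        have hcond : PySem.Int.mod 0 i = 0 ∨ PySem.Int.mod 0 0 = 0 := by
          left; rw [pv_cond_iff]; simp [pvGap]
        obtain ⟨f, hf⟩ : ∃ f, (1:Int).toNat * i.natAbs = f + 1 :=
          ⟨i.natAbs - 1, by have := Int.natAbs_pos.mpr hi; simp; omega⟩
        rw [hf, pvALoop, if_pos (by norm_num), if_pos hcond]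
        rw [show (1:Int) - 1 = 0 by norm_num, pvALoop_zero]
        show _ = pvBLoop |i| |(0:Int)| (1:Int).toNat [] (some 0) (some 0)
        rw [show (1:Int).toNat = 0 + 1 from rfl, pvBLoop]
        have hmin : ([some (0:Int), some 0].filterMap id).min? = some 0 := by
          simp [List.filterMap, List.min?]
        rw [hmin]
        rfl
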